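-- pv_equiv track=rewrite | github.com/olimiemma/ARC-Prize-2025-Kaggle-ARC-AGI-2-Benchmark- | arc_prize_2025_submission/versions/arc_solver_v1.py | fit_geom_plus_palette
-- ===== SOURCE A (Python) =====
-- from typing import Any, Dict, List, Tuple, Optional
--
-- Grid = List[List[int]]
--
-- def dims(g: Grid) -> Tuple[int, int]:
--     return (len(g), len(g[0]) if g else 0)
--
-- def rotate90(g: Grid) -> Grid:
--     h, w = dims(g)
--     return [[g[h - 1 - r][c] for r in range(h)] for c in range(w)]
--
-- def rotate180(g: Grid) -> Grid:
--     return [row[::-1] for row in g[::-1]]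
--
-- def rotate270(g: Grid) -> Grid:
--     h, w = dims(g)
--     return [[g[r][w - 1 - c] for r in range(h)] for c in range(w - 1, -1, -1)]
--
-- def flip_h(g: Grid) -> Grid:
--     return [row[::-1] for row in g]
--
-- def flip_v(g: Grid) -> Grid:
--     return g[::-1]
--
-- def transpose(g: Grid) -> Grid:
--     h, w = dims(g)
--     return [[g[r][c] for r in range(h)] for c in range(w)]
--
-- Op = str  # e.g., 'rot90', 'rot180', 'rot270', 'flip_h', 'flip_v', 'transpose'
--
-- def apply_geom(g: Grid, ops: List[Op]) -> Grid:
--     out = g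
--     for op in ops:
--         if op == "rot90":
--             out = rotate90(out)
--         elif op == "rot180":
--             out = rotate180(out)
--         elif op == "rot270":
--             out = rotate270(out)
--         elif op == "flip_h":
--             out = flip_h(out)
--         elif op == "flip_v":
--             out = flip_v(out)
--         elif op == "transpose":
--             out = transpose(out)
--         else:
--             # Unknown op: ignore (should not happen in controlled enumeration)
--             pass
--     return out
--
-- PaletteMap = Dict[int, int]
--
-- def infer_bijective_palette_map(src: Grid, dst: Grid) -> Optional[PaletteMap]:
--     """Infer a 1-1 color mapping such that applying it to src yields dst.
--     Returns None if inconsistent. Only constrains seen colors; unseen map to themselves.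
--     """
--     if dims(src) != dims(dst):
--         return None
--     mapping: Dict[int, int] = {}
--     inverse: Dict[int, int] = {}
--     h, w = dims(src)
--     for r in range(h):
--         for c in range(w):
--             s, d = src[r][c], dst[r][c]
--             if s in mapping and mapping[s] != d:
--                 return None
--             if d in inverse and inverse[d] != s:
--                 return None
--             mapping[s] = d
--             inverse[d] = s
--     return mapping
--
-- def merge_palette_maps(global_map: PaletteMap, local_map: PaletteMap) -> Optional[PaletteMap]:
--     merged = dict(global_map)
--     inv: Dict[int, int] = {v: k for k, v in merged.items()}
--     for k, v in local_map.items():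
--         if k in merged and merged[k] != v:
--             return None
--         if v in inv and inv[v] != k:
--             return None
--         merged[k] = v
--         inv[v] = k
--     return merged
--
-- def fit_geom_plus_palette(train_pairs: List[Tuple[Grid, Grid]], ops: List[Op]) -> Optional[PaletteMap]:
--     global_map: PaletteMap = {}
--     for src, dst in train_pairs:
--         trans = apply_geom(src, ops)
--         local = infer_bijective_palette_map(trans, dst)
--         if local is None:
--             return None
--         merged = merge_palette_maps(global_map, local)
--         if merged is None:
--             return None
--         global_map = merged
--     return global_map
-- ===== SOURCE B (Python) =====
-- from typing import Dict, List, Tuple, Optional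
--
-- Grid = List[List[int]]
-- Op = str
-- PaletteMap = Dict[int, int]
--
-- def dims(g: Grid) -> Tuple[int, int]:
--     return (len(g), len(g[0]) if g else 0)
--
-- def rotate90(g: Grid) -> Grid:
--     h, w = dims(g)
--     return [[g[h - 1 - r][c] for r in range(h)] for c in range(w)]
--
-- def rotate180(g: Grid) -> Grid:
--     return [row[::-1] for row in g[::-1]]
--
-- def rotate270(g: Grid) -> Grid:
--     h, w = dims(g)
--     return [[g[r][w - 1 - c] for r in range(h)] for c in range(w - 1, -1, -1)]
--
-- def flip_h(g: Grid) -> Grid: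
--     return [row[::-1] for row in g]
--
-- def flip_v(g: Grid) -> Grid:
--     return g[::-1]
--
-- def transpose(g: Grid) -> Grid:
--     h, w = dims(g)
--     return [[g[r][c] for r in range(h)] for c in range(w)]
--
-- def apply_geom(g: Grid, ops: List[Op]) -> Grid:
--     out = g
--     for op in ops:
--         if op == "rot90":
--             out = rotate90(out)
--         elif op == "rot180":
--             out = rotate180(out)
--         elif op == "rot270":
--             out = rotate270(out)
--         elif op == "flip_h":
--             out = flip_h(out)
--         elif op == "flip_v":
--             out = flip_v(out)
--         elif op == "transpose":
--             out = transpose(out)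
--     return out
--
-- def fit_geom_plus_palette(train_pairs: List[Tuple[Grid, Grid]], ops: List[Op]) -> Optional[PaletteMap]:
--     # One fused pass: a single global mapping and its inverse, updated cell by cell.
--     mapping: PaletteMap = {}
--     inverse: Dict[int, int] = {}
--     for src, dst in train_pairs:
--         trans = apply_geom(src, ops)
--         if dims(trans) != dims(dst):
--             return None
--         h, w = dims(trans)
--         for r in range(h):
--             for c in range(w):
--                 s, d = trans[r][c], dst[r][c]
--                 if mapping.get(s, d) != d or inverse.get(d, s) != s:
--                     return None
--                 mapping[s] = d
--                 inverse[d] = s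
--     return mapping
-- ===== Notes on version B (the rewrite author's own statement) =====
-- stated objective: simpler
-- what changed: B replaces A's per-pair pipeline (infer a fresh local bijective map, then copy the global dict, rebuild its inverse and merge the local map into it) with one fused pass that checks and updates a single global mapping and a single global inverse dict cell by cell, dropping the infer/merge helpers, the per-pair dict copy and the per-pair inverse rebuild.
-- outside the precondition, e.g. on fit_geom_plus_palette([([[1, 2]], [[3, 3]]), ([[1, 2], [3]], [[4, 5], [6]])], []): A returns None, B returns None
import Mathlib
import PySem

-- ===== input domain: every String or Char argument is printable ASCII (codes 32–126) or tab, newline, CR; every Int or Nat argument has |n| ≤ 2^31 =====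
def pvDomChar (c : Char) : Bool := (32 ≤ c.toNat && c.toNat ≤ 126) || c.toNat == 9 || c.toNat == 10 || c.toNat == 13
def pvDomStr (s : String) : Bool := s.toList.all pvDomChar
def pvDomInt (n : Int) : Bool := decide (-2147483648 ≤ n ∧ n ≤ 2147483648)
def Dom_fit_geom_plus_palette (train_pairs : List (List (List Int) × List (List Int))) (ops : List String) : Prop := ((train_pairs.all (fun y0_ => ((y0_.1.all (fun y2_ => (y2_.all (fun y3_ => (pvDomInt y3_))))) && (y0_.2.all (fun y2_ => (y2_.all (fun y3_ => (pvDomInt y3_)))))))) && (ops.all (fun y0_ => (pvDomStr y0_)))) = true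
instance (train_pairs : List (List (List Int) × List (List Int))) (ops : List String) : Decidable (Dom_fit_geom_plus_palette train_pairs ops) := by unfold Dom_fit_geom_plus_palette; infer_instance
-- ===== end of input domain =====

-- B fuses A's per-pair infer_bijective_palette_map + merge_palette_maps into one pass over the
-- cells that updates a single global mapping and its inverse (objective: simpler).

-- ===== SHARED GEOMETRY HELPERS (the same Python helper code appears verbatim in Source A and Source B) =====

-- g[r][c]; total form, exact where Python does not raise (all indices reached under Pre_ are in range)
def pvIdx (g : List (List Int)) (r c : Int) : Int :=
  PySem.List.pyGetD (PySem.List.pyGetD g r []) c 0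

-- xs[::-1]
def pvRev {α : Type} (xs : List α) : List α :=
  (PySem.List.slice? xs none none (-1)).getD []

-- dims(g) = (len(g), len(g[0]) if g else 0)
def pvDims (g : List (List Int)) : Int × Int :=
  ((g.length : Int), match g with | [] => (0 : Int) | row :: _ => (row.length : Int))

def pvRot90 (g : List (List Int)) : List (List Int) :=
  (PySem.List.pyRange 0 (pvDims g).2 1).map (fun c =>
    (PySem.List.pyRange 0 (pvDims g).1 1).map (fun r => pvIdx g ((pvDims g).1 - 1 - r) c))

def pvRot180 (g : List (List Int)) : List (List Int) :=
  (pvRev g).map pvRev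

def pvRot270 (g : List (List Int)) : List (List Int) :=
  (PySem.List.pyRange ((pvDims g).2 - 1) (-1) (-1)).map (fun c =>
    (PySem.List.pyRange 0 (pvDims g).1 1).map (fun r => pvIdx g r ((pvDims g).2 - 1 - c)))

def pvFlipH (g : List (List Int)) : List (List Int) := g.map pvRev

def pvFlipV (g : List (List Int)) : List (List Int) := pvRev g

def pvTranspose (g : List (List Int)) : List (List Int) :=
  (PySem.List.pyRange 0 (pvDims g).2 1).map (fun c =>
    (PySem.List.pyRange 0 (pvDims g).1 1).map (fun r => pvIdx g r c))

def pvApplyGeom (g : List (List Int)) (ops : List String) : List (List Int) :=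
  ops.foldl (fun out op =>
    if op = "rot90" then pvRot90 out
    else if op = "rot180" then pvRot180 out
    else if op = "rot270" then pvRot270 out
    else if op = "flip_h" then pvFlipH out
    else if op = "flip_v" then pvFlipV out
    else if op = "transpose" then pvTranspose out
    else out) g

-- state: (mapping, inverse)
def pvSt : Type := PySem.Dict Int Int × PySem.Dict Int Int

-- ===== PORT A =====

-- loop body shared by A's infer_bijective_palette_map and merge_palette_maps (the two Python
-- loop bodies are literally the same four lines, on (mapping, inverse) resp. (merged, inv))
def pvStepA (st : pvSt) (x : Int × Int) : Option pvSt :=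
  if st.1.contains x.1 && !(st.1.getD x.1 0 == x.2) then none
  else if st.2.contains x.2 && !(st.2.getD x.2 0 == x.1) then none
  else some (st.1.insert x.1 x.2, st.2.insert x.2 x.1)

def pvInfer (src dst : List (List Int)) : Option (PySem.Dict Int Int) :=
  if pvDims src ≠ pvDims dst then none
  else
    ((PySem.List.pyRange 0 (pvDims src).1 1).foldlM (fun st r =>
       (PySem.List.pyRange 0 (pvDims src).2 1).foldlM (fun st c =>
          pvStepA st (pvIdx src r c, pvIdx dst r c)) st)
      ((PySem.Dict.empty, PySem.Dict.empty) : pvSt)).map (·.1)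

def pvMerge (global_map local_map : PySem.Dict Int Int) : Option (PySem.Dict Int Int) :=
  (local_map.items.foldlM pvStepA
     ((global_map,
       global_map.items.foldl (fun d kv => d.insert kv.2 kv.1) PySem.Dict.empty) : pvSt)).map (·.1)

-- one iteration of A's loop over train_pairs
def pvPairA (ops : List String) (gm : PySem.Dict Int Int)
    (pr : List (List Int) × List (List Int)) : Option (PySem.Dict Int Int) :=
  match pvInfer (pvApplyGeom pr.1 ops) pr.2 with
  | none => none
  | some loc => pvMerge gm loc

def fit_geom_plus_palette (train_pairs : List (List (List Int) × List (List Int))) (ops : List String) : Option (List (Int × Int)) :=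
  (train_pairs.foldlM (pvPairA ops) PySem.Dict.empty).map (fun d => PySem.Dict.items d)

-- ===== PORT B =====

-- Source B's fused cell check: mapping.get(s, d) != d or inverse.get(d, s) != s
def pvStepB (st : pvSt) (x : Int × Int) : Option pvSt :=
  if !(st.1.getD x.1 x.2 == x.2) || !(st.2.getD x.2 x.1 == x.1) then none
  else some (st.1.insert x.1 x.2, st.2.insert x.2 x.1)

-- one iteration of Source B's loop over train_pairs
def pvPairB (ops : List String) (st : pvSt)
    (pr : List (List Int) × List (List Int)) : Option pvSt :=
  -- trans = apply_geom(src, ops), inlined at its three uses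
  if pvDims (pvApplyGeom pr.1 ops) ≠ pvDims pr.2 then none
  else (PySem.List.pyRange 0 (pvDims (pvApplyGeom pr.1 ops)).1 1).foldlM (fun st r =>
         (PySem.List.pyRange 0 (pvDims (pvApplyGeom pr.1 ops)).2 1).foldlM (fun st c =>
            pvStepB st (pvIdx (pvApplyGeom pr.1 ops) r c, pvIdx pr.2 r c)) st) st

def fit_geom_plus_palette_alt (train_pairs : List (List (List Int) × List (List Int))) (ops : List String) : Option (List (Int × Int)) :=
  (train_pairs.foldlM (pvPairB ops) ((PySem.Dict.empty, PySem.Dict.empty) : pvSt)).map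
    (fun st => PySem.Dict.items st.1)

-- ===== PRECONDITION & SPEC =====

-- shape calculus: row-length lists of the grids as the ops transform them
def pvLens (g : List (List Int)) : List Nat := g.map List.length

def pvHead0 (L : List Nat) : Nat := match L with | [] => 0 | w :: _ => w

-- a scan over columns 0..L[0]-1 of rows with lengths L hits a missing cell
def pvBadLens (L : List Nat) : Bool := L.any (fun l => l < pvHead0 L)

-- how one geometry op transforms the row-length list (none = IndexError)
def pvOpLens (o : Option (List Nat)) (op : String) : Option (List Nat) :=
  o.bind (fun L =>
    if op = "rot90" ∨ op = "rot270" ∨ op = "transpose" then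
      if pvBadLens L then none else some (List.replicate (pvHead0 L) L.length)
    else if op = "rot180" ∨ op = "flip_v" then some L.reverse
    else some L)

-- per-pair shape outcome: none = the scan raises IndexError, some true = the dims test fails
-- (A returns None here, later pairs are never reached), some false = the pair scans cleanly
def pvPairState (ops : List String) (pr : List (List Int) × List (List Int)) : Option Bool :=
  match ops.foldl pvOpLens (some (pvLens pr.1)) with
  | none => none
  | some Lt =>
      if Lt.length ≠ (pvLens pr.2).length ∨ pvHead0 Lt ≠ pvHead0 (pvLens pr.2) then some true
      else if pvBadLens Lt || (pvLens pr.2).any (fun l => l < pvHead0 Lt) then none else some false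

def pvSafePrefix (ops : List String) : List (List (List Int) × List (List Int)) → Bool
  | [] => true
  | pr :: rest =>
      match pvPairState ops pr with
      | none => false
      | some true => true
      | some false => pvSafePrefix ops rest

-- Pre_ excludes exactly the inputs on which the Python A raises IndexError scanning a ragged
-- grid before any pair fails the dims test, plus the rare inputs whose raising pair is unreached
-- only because an earlier pair produced a palette conflict (there A returns None and B agrees).
def Pre_fit_geom_plus_palette (train_pairs : List (List (List Int) × List (List Int))) (ops : List String) : Prop :=
  pvSafePrefix ops train_pairs = true

instance (train_pairs : List (List (List Int) × List (List Int))) (ops : List String) : Decidable (Pre_fit_geom_plus_palette train_pairs ops) := by unfold Pre_fit_geom_plus_palette; infer_instance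

def pvWitness_fit_geom_plus_palette : (List (List (List Int) × List (List Int))) × List String :=
  ([([[1, 2], [3, 4]], [[4, 2], [3, 1]])], ["rot180"])

def Spec_fit_geom_plus_palette (train_pairs : List (List (List Int) × List (List Int))) (ops : List String) (out : Option (List (Int × Int))) : Prop := out = fit_geom_plus_palette_alt train_pairs ops
instance (train_pairs : List (List (List Int) × List (List Int))) (ops : List String) (out : Option (List (Int × Int))) : Decidable (Spec_fit_geom_plus_palette train_pairs ops out) := by unfold Spec_fit_geom_plus_palette; infer_instance

-- ===== CLAIM (what is proved, stated in full; the proofs are below) =====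
def Claim_equal_fit_geom_plus_palette : Prop := ∀ (train_pairs : List (List (List Int) × List (List Int))) (ops : List String), Dom_fit_geom_plus_palette train_pairs ops → Pre_fit_geom_plus_palette train_pairs ops → Spec_fit_geom_plus_palette train_pairs ops (fit_geom_plus_palette train_pairs ops)

-- ===== LEMMAS AND PROOFS =====

-- well-formed state: mapping has unique keys and unique values, inverse is its item-wise swap
def pvWF (st : pvSt) : Prop :=
  (st.1.items.map Prod.fst).Nodup ∧ (st.1.items.map Prod.snd).Nodup ∧
    st.2.items = st.1.items.map Prod.swap

theorem pvFoldlM_cons {σ α : Type} (st : σ) (x : α) (l : List α)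
    (f : σ → α → Option σ) :
    List.foldlM f st (x :: l) = (f st x).bind (fun s => List.foldlM f s l) := rfl

-- get?/getD/contains bookkeeping ---------------------------------------------------------------

theorem pvStepA_none_iff (st : pvSt) (x : Int × Int) :
    pvStepA st x = none ↔
      (∃ u, st.1.get? x.1 = some u ∧ u ≠ x.2) ∨ (∃ u, st.2.get? x.2 = some u ∧ u ≠ x.1) := by
  unfold pvStepA
  rw [PySem.Dict.getD_eq_get?_getD, PySem.Dict.getD_eq_get?_getD,
      PySem.Dict.contains_eq_isSome_get?, PySem.Dict.contains_eq_isSome_get?]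
  rcases h1 : st.1.get? x.1 with _ | v1 <;> rcases h2 : st.2.get? x.2 with _ | v2 <;>
    simp <;> try (by_cases e1 : v1 = x.2 <;> simp [e1]) <;> try (by_cases e2 : v2 = x.1 <;> simp [e2])

theorem pvStepA_some_eq (st st' : pvSt) (x : Int × Int) (h : pvStepA st x = some st') :
    st' = (st.1.insert x.1 x.2, st.2.insert x.2 x.1) := by
  unfold pvStepA at h
  split_ifs at h <;> simp_all

theorem pvStepB_eq_pvStepA : pvStepB = pvStepA := by
  funext st x
  unfold pvStepA pvStepB
  rw [PySem.Dict.getD_eq_get?_getD, PySem.Dict.getD_eq_get?_getD,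
      PySem.Dict.getD_eq_get?_getD, PySem.Dict.getD_eq_get?_getD,
      PySem.Dict.contains_eq_isSome_get?, PySem.Dict.contains_eq_isSome_get?]
  rcases h1 : st.1.get? x.1 with _ | v1 <;> rcases h2 : st.2.get? x.2 with _ | v2 <;>
    simp <;> try (by_cases e1 : v1 = x.2 <;> simp [e1]) <;> try (by_cases e2 : v2 = x.1 <;> simp [e2])

theorem pvMapId (l : List (Int × Int)) (k v : Int) (hnd : (l.map Prod.fst).Nodup)
    (hm : (k, v) ∈ l) : l.map (fun p => if p.1 == k then (k, v) else p) = l := by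
  induction l with
  | nil => simp
  | cons p l ih =>
    simp only [List.map_cons, List.nodup_cons, List.mem_map] at hnd
    rcases List.mem_cons.mp hm with h | h
    · subst h
      simp only [List.map_cons, beq_self_eq_true, if_true]
      congr 1
      have : ∀ q ∈ l, (fun p => if p.1 == k then (k, v) else p) q = q := by
        intro q hq
        have : q.1 ≠ k := fun e => hnd.1 ⟨q, hq, e⟩
        simp [this]
      rw [List.map_congr_left this]
      simp
    · have hk : p.1 ≠ k := by
        intro e
        exact hnd.1 ⟨(k, v), h, by simp [e]⟩
      simp only [List.map_cons, if_neg ((by simpa using hk) : ¬ ((p.1 == k) = true))]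
      rw [ih hnd.2 h]

theorem pvInsert_same (d : PySem.Dict Int Int) (k v : Int) (hnd : (d.items.map Prod.fst).Nodup)
    (h : d.get? k = some v) : d.insert k v = d := by
  apply PySem.Dict.ext
  have hc : d.contains k = true := by rw [PySem.Dict.contains_eq_isSome_get?, h]; rfl
  rw [PySem.Dict.items_insert_of_contains _ _ hc]
  exact pvMapId d.items k v hnd (PySem.Dict.mem_items_of_get?_eq_some _ h)

-- well-formedness facts ------------------------------------------------------------------------

theorem pvEmpty_items : (PySem.Dict.empty : PySem.Dict Int Int).items = [] := rfl

theorem pvWF_empty : pvWF ((PySem.Dict.empty, PySem.Dict.empty) : pvSt) := by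
  refine ⟨?_, ?_, ?_⟩ <;> simp [pvEmpty_items]

theorem pvKeys_eq (d : PySem.Dict Int Int) : d.keys = d.items.map Prod.fst := rfl

theorem pvWF_snd_keys (st : pvSt) (h : pvWF st) :
    st.2.items.map Prod.fst = st.1.items.map Prod.snd := by
  rw [h.2.2, List.map_map]
  rfl

theorem pvWF_snd_keys_nodup (st : pvSt) (h : pvWF st) : (st.2.items.map Prod.fst).Nodup := by
  rw [pvWF_snd_keys st h]; exact h.2.1

theorem pvMem_swap (l : List (Int × Int)) (a b : Int) :
    (a, b) ∈ l.map Prod.swap ↔ (b, a) ∈ l := by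
  simp

theorem pvWF_inv_get? (S : pvSt) (h : pvWF S) (s d : Int) (hg : S.1.get? s = some d) :
    S.2.get? d = some s := by
  have hm : (s, d) ∈ S.1.items := PySem.Dict.mem_items_of_get?_eq_some _ hg
  have hm2 : (d, s) ∈ S.2.items := by rw [h.2.2]; exact (pvMem_swap _ d s).mpr hm
  exact PySem.Dict.get?_of_mem_items _ hm2 (pvWF_snd_keys_nodup S h)

theorem pvWF_fst_get? (S : pvSt) (h : pvWF S) (s d : Int) (hg : S.2.get? d = some s) :
    S.1.get? s = some d := by
  have hm2 : (d, s) ∈ S.2.items := PySem.Dict.mem_items_of_get?_eq_some _ hg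
  have hm : (s, d) ∈ S.1.items := by
    rw [h.2.2] at hm2; exact (pvMem_swap _ d s).mp hm2
  exact PySem.Dict.get?_of_mem_items _ hm h.1

theorem pvStepA_of_get? (S : pvSt) (x : Int × Int) (hWF : pvWF S)
    (h1 : S.1.get? x.1 = some x.2) : pvStepA S x = some S := by
  have h2 : S.2.get? x.2 = some x.1 := pvWF_inv_get? S hWF x.1 x.2 h1
  unfold pvStepA
  rw [PySem.Dict.getD_eq_get?_getD, PySem.Dict.getD_eq_get?_getD,
      PySem.Dict.contains_eq_isSome_get?, PySem.Dict.contains_eq_isSome_get?, h1, h2]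
  simp [pvInsert_same S.1 x.1 x.2 hWF.1 h1,
        pvInsert_same S.2 x.2 x.1 (pvWF_snd_keys_nodup S hWF) h2]

theorem pvStepA_some_cases (st st' : pvSt) (x : Int × Int) (hwf : pvWF st)
    (h : pvStepA st x = some st') :
    (st' = st ∧ st.1.get? x.1 = some x.2) ∨
    (st'.1.items = st.1.items ++ [x] ∧ st'.2.items = st.2.items ++ [x.swap] ∧
      st.1.contains x.1 = false ∧ st.2.contains x.2 = false) := by
  have hval := pvStepA_some_eq st st' x h
  have hnone := (not_iff_not.mpr (pvStepA_none_iff st x)).mp (by simp [h])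
  push Not at hnone
  rcases h1 : st.1.get? x.1 with _ | v1
  · -- x.1 fresh in mapping
    have hc1 : st.1.contains x.1 = false := by
      rw [PySem.Dict.contains_eq_isSome_get?, h1]; rfl
    rcases h2 : st.2.get? x.2 with _ | v2
    · have hc2 : st.2.contains x.2 = false := by
        rw [PySem.Dict.contains_eq_isSome_get?, h2]; rfl
      right
      refine ⟨?_, ?_, hc1, hc2⟩
      · rw [hval]; exact PySem.Dict.items_insert_of_not_contains _ _ hc1
      · rw [hval]; exact PySem.Dict.items_insert_of_not_contains _ _ hc2
    · exfalso
      have hv2 : v2 = x.1 := hnone.2 v2 h2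
      subst hv2
      have := pvWF_fst_get? st hwf x.1 x.2 h2
      rw [h1] at this
      simp at this
  · have hv1 : v1 = x.2 := hnone.1 v1 h1
    subst hv1
    left
    refine ⟨?_, rfl⟩
    rw [hval]
    have h2 := pvWF_inv_get? st hwf x.1 x.2 h1
    rw [pvInsert_same st.1 x.1 x.2 hwf.1 h1,
        pvInsert_same st.2 x.2 x.1 (pvWF_snd_keys_nodup st hwf) h2]
    rfl

theorem pvNot_contains_not_mem (d : PySem.Dict Int Int) (k : Int)
    (hc : d.contains k = false) : k ∉ d.items.map Prod.fst := by
  intro hm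
  rw [PySem.Dict.contains_eq_decide_mem_keys] at hc
  rw [pvKeys_eq] at hc
  simp [hm] at hc

theorem pvStepA_WF (st st' : pvSt) (x : Int × Int) (hwf : pvWF st)
    (h : pvStepA st x = some st') : pvWF st' := by
  rcases pvStepA_some_cases st st' x hwf h with ⟨he, _⟩ | ⟨h1, h2, hc1, hc2⟩
  · rwa [he]
  · obtain ⟨hk, hv, hs⟩ := hwf
    have hk1 : x.1 ∉ st.1.items.map Prod.fst := pvNot_contains_not_mem st.1 x.1 hc1
    have hv1 : x.2 ∉ st.1.items.map Prod.snd := by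
      rw [← pvWF_snd_keys st ⟨hk, hv, hs⟩]
      exact pvNot_contains_not_mem st.2 x.2 hc2
    refine ⟨?_, ?_, ?_⟩
    · rw [h1, List.map_append]
      simp only [List.map_cons, List.map_nil]
      exact List.Nodup.append hk (List.nodup_singleton _) (by simpa using hk1)
    · rw [h1, List.map_append]
      simp only [List.map_cons, List.map_nil]
      exact List.Nodup.append hv (List.nodup_singleton _) (by simpa using hv1)
    · rw [h1, h2, hs, List.map_append]
      rfl

theorem pvRun_extends (cells : List (Int × Int)) :
    ∀ (st st' : pvSt), pvWF st → List.foldlM pvStepA st cells = some st' →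
      (∃ δ, st'.1.items = st.1.items ++ δ) ∧ pvWF st' := by
  induction cells with
  | nil =>
    intro st st' hwf h
    simp only [List.foldlM_nil] at h
    cases h
    exact ⟨⟨[], by simp⟩, hwf⟩
  | cons x cells ih =>
    intro st st' hwf h
    rw [pvFoldlM_cons] at h
    cases hstep : pvStepA st x with
    | none => rw [hstep, Option.bind_none] at h; simp at h
    | some st1 =>
      rw [hstep, Option.bind_some] at h
      obtain ⟨⟨δ, hδ⟩, hwf'⟩ := ih st1 st' (pvStepA_WF st st1 x hwf hstep) h
      refine ⟨?_, hwf'⟩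
      rcases pvStepA_some_cases st st1 x hwf hstep with ⟨he, _⟩ | ⟨h1, _, _, _⟩
      · exact ⟨δ, by rw [hδ, he]⟩
      · exact ⟨[x] ++ δ, by rw [hδ, h1, List.append_assoc]⟩

theorem pvStepA_none_transfer (L S : pvSt) (x : Int × Int) (hL : pvWF L)
    (hsim : ∀ s d, (s, d) ∈ L.1.items → S.1.get? s = some d ∧ S.2.get? d = some s)
    (h : pvStepA L x = none) : pvStepA S x = none := by
  rcases (pvStepA_none_iff L x).mp h with ⟨u, hu, hne⟩ | ⟨u, hu, hne⟩
  · have hm : (x.1, u) ∈ L.1.items := PySem.Dict.mem_items_of_get?_eq_some _ hu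
    exact (pvStepA_none_iff S x).mpr (Or.inl ⟨u, (hsim _ _ hm).1, hne⟩)
  · have hm2 : (x.2, u) ∈ L.2.items := PySem.Dict.mem_items_of_get?_eq_some _ hu
    have hm : (u, x.2) ∈ L.1.items := by
      rw [hL.2.2] at hm2; exact (pvMem_swap _ x.2 u).mp hm2
    exact (pvStepA_none_iff S x).mpr (Or.inr ⟨u, (hsim _ _ hm).2, hne⟩)

-- the fused pass simulates "local inference, then merge into the base state S₀" ----------------

theorem pvMain (S₀ : pvSt) (cells : List (Int × Int)) :
    ∀ (L S : pvSt), pvWF L → pvWF S →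
      (∀ s d, (s, d) ∈ L.1.items → S.1.get? s = some d ∧ S.2.get? d = some s) →
      List.foldlM pvStepA S₀ L.1.items = some S →
      List.foldlM pvStepA S cells =
        (List.foldlM pvStepA L cells).bind (fun L' => List.foldlM pvStepA S₀ L'.1.items) := by
  induction cells with
  | nil =>
    intro L S hL hS hsim hpre
    simp [hpre]
  | cons x cells ih =>
    intro L S hL hS hsim hpre
    rw [pvFoldlM_cons, pvFoldlM_cons]
    cases hstep : pvStepA L x with
    | none =>
      rw [pvStepA_none_transfer L S x hL hsim hstep, Option.bind_none, Option.bind_none]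
    | some L' =>
      rw [Option.bind_some]
      rcases pvStepA_some_cases L L' x hL hstep with ⟨he, hg⟩ | ⟨h1, _h2, hc1, hc2⟩
      · -- the cell is already recorded in L (consistently): both sides keep their state
        subst he
        rw [pvStepA_of_get? S x hS ((hsim _ _ (PySem.Dict.mem_items_of_get?_eq_some _ hg)).1),
            Option.bind_some]
        exact ih _ S hL hS hsim hpre
      · -- a genuinely new cell
        have hL' : pvWF L' := pvStepA_WF L L' x hL hstep
        have hpre' : List.foldlM pvStepA S₀ L'.1.items = pvStepA S x := by
          rw [h1, List.foldlM_append, hpre]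
          show (pvStepA S x).bind _ = _
          cases pvStepA S x <;> rfl
        cases hSstep : pvStepA S x with
        | none =>
          rw [Option.bind_none]
          cases hrun : List.foldlM pvStepA L' cells with
          | none => rw [Option.bind_none]
          | some L'' =>
            rw [Option.bind_some]
            obtain ⟨⟨δ, hδ⟩, _⟩ := pvRun_extends cells L' L'' hL' hrun
            rw [hδ, List.foldlM_append, hpre', hSstep]
            rfl
        | some S' =>
          rw [Option.bind_some]
          have hS' : pvWF S' := pvStepA_WF S S' x hS hSstep
          have hS'val := pvStepA_some_eq S S' x hSstep
          have hx1 : x.1 ∉ L.1.items.map Prod.fst := pvNot_contains_not_mem L.1 x.1 hc1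
          have hx2 : x.2 ∉ L.1.items.map Prod.snd := by
            rw [← pvWF_snd_keys L hL]
            exact pvNot_contains_not_mem L.2 x.2 hc2
          have hsim' : ∀ s d, (s, d) ∈ L'.1.items →
              S'.1.get? s = some d ∧ S'.2.get? d = some s := by
            intro s d hm
            rw [h1, List.mem_append] at hm
            rcases hm with hm | hm
            · have hs1 : s ≠ x.1 := by
                intro e; subst e
                exact hx1 (List.mem_map.mpr ⟨(x.1, d), hm, rfl⟩)
              have hd2 : d ≠ x.2 := by
                intro e; subst e
                exact hx2 (List.mem_map.mpr ⟨(s, x.2), hm, rfl⟩)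
              rw [hS'val]
              constructor
              · rw [PySem.Dict.get?_insert, if_neg hs1]; exact (hsim _ _ hm).1
              · rw [PySem.Dict.get?_insert, if_neg hd2]; exact (hsim _ _ hm).2
            · simp only [List.mem_singleton] at hm
              subst hm
              rw [hS'val]
              exact ⟨PySem.Dict.get?_insert_self _ _ _, PySem.Dict.get?_insert_self _ _ _⟩
          rw [← hpre'] at hSstep
          exact ih L' S' hL' hS' hsim' hSstep

theorem pvPair (S₀ : pvSt) (cells : List (Int × Int)) (h : pvWF S₀) :
    List.foldlM pvStepA S₀ cells =
      (List.foldlM pvStepA ((PySem.Dict.empty, PySem.Dict.empty) : pvSt) cells).bind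
        (fun L' => List.foldlM pvStepA S₀ L'.1.items) := by
  apply pvMain S₀ cells ((PySem.Dict.empty, PySem.Dict.empty) : pvSt) S₀ pvWF_empty h
  · intro s d hm
    rw [pvEmpty_items] at hm
    simp at hm
  · rfl

-- the double loop over rows and columns is the fold over the row-major cell list
theorem pvNested (step : pvSt → (Int × Int) → Option pvSt) (t d : List (List Int)) (st : pvSt) :
    (PySem.List.pyRange 0 (pvDims t).1 1).foldlM (fun st r =>
        (PySem.List.pyRange 0 (pvDims t).2 1).foldlM (fun st c =>
           step st (pvIdx t r c, pvIdx d r c)) st) st =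
      List.foldlM step st ((PySem.List.pyRange 0 (pvDims t).1 1).flatMap (fun r =>
        (PySem.List.pyRange 0 (pvDims t).2 1).map (fun c => (pvIdx t r c, pvIdx d r c)))) := by
  generalize (PySem.List.pyRange 0 (pvDims t).1 1) = rows
  induction rows generalizing st with
  | nil => simp
  | cons r rows ih =>
    rw [List.flatMap_cons, List.foldlM_append, List.foldlM_cons, List.foldlM_map]
    cases List.foldlM (fun st c => step st (pvIdx t r c, pvIdx d r c)) st
        (PySem.List.pyRange 0 (pvDims t).2 1) <;> simp [ih]

-- A's rebuilt inverse {v: k for k, v in merged.items()} is B's carried inverse dict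
theorem pvInv_eq (gm : PySem.Dict Int Int) (inv : PySem.Dict Int Int)
    (hv : (gm.items.map Prod.snd).Nodup) (hinv : inv.items = gm.items.map Prod.swap) :
    gm.items.foldl (fun d kv => d.insert kv.2 kv.1) PySem.Dict.empty = inv := by
  apply PySem.Dict.ext
  rw [PySem.Dict.items_foldl_insert_fresh gm.items (fun kv => kv.2) (fun kv => kv.1)
        PySem.Dict.empty (fun a _ => PySem.Dict.contains_empty _) hv, hinv]
  rfl

theorem pvPairB_WF (ops : List String) (pr : List (List Int) × List (List Int))
    (st st' : pvSt) (hwf : pvWF st) (h : pvPairB ops st pr = some st') : pvWF st' := by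
  unfold pvPairB at h
  split_ifs at h with hd
  rw [pvStepB_eq_pvStepA, pvNested pvStepA (pvApplyGeom pr.1 ops) pr.2 st] at h
  exact (pvRun_extends _ st st' hwf h).2

theorem pvPairAB (ops : List String) (pr : List (List Int) × List (List Int))
    (st : pvSt) (hwf : pvWF st) :
    pvPairA ops st.1 pr = (pvPairB ops st pr).map (fun s => s.1) := by
  unfold pvPairA pvPairB pvInfer
  by_cases hd : pvDims (pvApplyGeom pr.1 ops) ≠ pvDims pr.2
  · rw [if_pos hd, if_pos hd]
    rfl
  · rw [if_neg hd, if_neg hd, pvStepB_eq_pvStepA,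
        pvNested pvStepA (pvApplyGeom pr.1 ops) pr.2,
        pvNested pvStepA (pvApplyGeom pr.1 ops) pr.2 st,
        pvPair st _ hwf]
    cases hrun : List.foldlM pvStepA ((PySem.Dict.empty, PySem.Dict.empty) : pvSt)
        ((PySem.List.pyRange 0 (pvDims (pvApplyGeom pr.1 ops)).1 1).flatMap (fun r =>
          (PySem.List.pyRange 0 (pvDims (pvApplyGeom pr.1 ops)).2 1).map (fun c =>
            (pvIdx (pvApplyGeom pr.1 ops) r c, pvIdx pr.2 r c)))) with
    | none => rfl
    | some L' =>
      rw [Option.map_some, Option.bind_some]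
      show pvMerge st.1 L'.1 = _
      unfold pvMerge
      rw [pvInv_eq st.1 st.2 hwf.2.1 hwf.2.2]
      rfl

theorem pvLoop (train_pairs : List (List (List Int) × List (List Int))) (ops : List String) :
    ∀ (st : pvSt), pvWF st →
      List.foldlM (pvPairA ops) st.1 train_pairs =
        (List.foldlM (pvPairB ops) st train_pairs).map (fun st => st.1) := by
  induction train_pairs with
  | nil => intro st _; rfl
  | cons pr tps ih =>
    intro st hwf
    rw [pvFoldlM_cons, pvFoldlM_cons, pvPairAB ops pr st hwf]
    cases hPB : pvPairB ops st pr with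
    | none => rfl
    | some st' =>
      rw [Option.map_some, Option.bind_some, Option.bind_some]
      exact ih st' (pvPairB_WF ops pr st st' hwf hPB)

-- ===== VERDICT (by name: the statement is the Claim_ definition above) =====
theorem fit_geom_plus_palette_spec : Claim_equal_fit_geom_plus_palette := by
  intro train_pairs ops _ _
  unfold Spec_fit_geom_plus_palette fit_geom_plus_palette fit_geom_plus_palette_alt
  rw [pvLoop train_pairs ops ((PySem.Dict.empty, PySem.Dict.empty) : pvSt) pvWF_empty]
  cases List.foldlM (pvPairB ops) ((PySem.Dict.empty, PySem.Dict.empty) : pvSt) train_pairs <;> rfl
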